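-- pv_equiv track=rewrite | github.com/j0s/aoc2021 | 14/solution_2.py | parse_polymer
-- ===== SOURCE A (Python) =====
-- from typing import Dict, Tuple
--
-- def parse_polymer(polymer: str) -> Tuple[Dict[str, int], Dict[str, int]]:
--     pair_frequencies: Dict[str, int] = {}
--     char_frequencies: Dict[str, int] = {}
--     for i in range(len(polymer) - 1):
--         pair = polymer[i] + polymer[i + 1]
--         if pair not in pair_frequencies:
--             pair_frequencies[pair] = 0
--         pair_frequencies[pair] += 1
--     for char in polymer:
--         if char not in char_frequencies:
--             char_frequencies[char] = 0
--         char_frequencies[char] += 1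
--
--     return pair_frequencies, char_frequencies
-- ===== SOURCE B (Python) =====
-- def parse_polymer(polymer):
--     # One fused pass over adjacent pairs; char counts derived from pair first
--     # components plus the trailing character, instead of a second scan.
--     pair_frequencies = {}
--     char_frequencies = {}
--     for a, b in zip(polymer, polymer[1:]):
--         pair = a + b
--         pair_frequencies[pair] = pair_frequencies.get(pair, 0) + 1
--         char_frequencies[a] = char_frequencies.get(a, 0) + 1
--     if polymer:
--         last = polymer[-1]
--         char_frequencies[last] = char_frequencies.get(last, 0) + 1
--     return pair_frequencies, char_frequencies
-- ===== Notes on version B (the rewrite author's own statement) =====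
-- stated objective: alternative
-- what changed: B makes one fused pass over zip(polymer, polymer[1:]) updating both dicts with dict.get, deriving character counts from the first component of each adjacent pair plus the trailing character, instead of A's two separate loops (an index loop over pairs and a second full scan over characters, each with a membership test).
import Mathlib
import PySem

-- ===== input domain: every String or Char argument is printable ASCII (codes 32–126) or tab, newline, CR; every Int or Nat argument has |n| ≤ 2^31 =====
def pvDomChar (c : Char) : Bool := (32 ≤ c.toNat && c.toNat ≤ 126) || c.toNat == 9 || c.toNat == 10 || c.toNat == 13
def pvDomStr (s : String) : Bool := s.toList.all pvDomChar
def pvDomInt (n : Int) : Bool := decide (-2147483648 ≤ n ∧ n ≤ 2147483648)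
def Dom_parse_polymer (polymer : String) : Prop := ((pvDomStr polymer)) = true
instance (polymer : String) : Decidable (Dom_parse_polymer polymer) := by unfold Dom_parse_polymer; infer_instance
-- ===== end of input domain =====

-- B replaces A's two scans (index loop over pairs + full character scan) by one fused pass over
-- zip(polymer, polymer[1:]) that counts each pair and its first character, finishing with the last
-- character — a different decomposition of the same O(n) work (objective: alternative).

-- ===== PORT A =====
def parse_polymer (polymer : String) : (List (String × Int)) × (List (String × Int)) :=
  -- for i in range(len(polymer) - 1): pair = polymer[i] + polymer[i+1]; if pair not in d: d[pair] = 0; d[pair] += 1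
  -- (indices i and i+1 are always in range, so pyGetD's default ' ' is never used)
  (((PySem.List.pyRange 0 (PySem.Str.len polymer - 1) 1).foldl
      (fun (d : PySem.Dict String Int) (i : Int) =>
        let pair := String.mk [PySem.List.pyGetD polymer.toList i ' ',
                               PySem.List.pyGetD polymer.toList (i + 1) ' ']
        let d1 := if d.contains pair then d else d.insert pair 0
        d1.insert pair (d1.getD pair 0 + 1))
      PySem.Dict.empty).items,
   -- for char in polymer: if char not in d: d[char] = 0; d[char] += 1  (a Python char is a 1-char string)
   ((polymer.toList.foldl
      (fun (d : PySem.Dict String Int) (c : Char) =>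
        let k := String.mk [c]
        let d1 := if d.contains k then d else d.insert k 0
        d1.insert k (d1.getD k 0 + 1))
      PySem.Dict.empty).items))

-- ===== PORT B =====
def parse_polymer_alt (polymer : String) : (List (String × Int)) × (List (String × Int)) :=
  -- for a, b in zip(polymer, polymer[1:]): both dicts updated with dict.get  (polymer[1:] = drop 1)
  let p :=
    (polymer.toList.zip (polymer.toList.drop 1)).foldl
      (fun (s : PySem.Dict String Int × PySem.Dict String Int) ab =>
        (s.1.insert (String.mk [ab.1, ab.2]) (s.1.getD (String.mk [ab.1, ab.2]) 0 + 1),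
         s.2.insert (String.mk [ab.1]) (s.2.getD (String.mk [ab.1]) 0 + 1)))
      (PySem.Dict.empty, PySem.Dict.empty)
  -- if polymer: last = polymer[-1]; char_frequencies[last] = char_frequencies.get(last, 0) + 1
  let cf :=
    if polymer.toList = [] then p.2
    else
      let last := String.mk [PySem.List.pyGetD polymer.toList (-1) ' ']
      p.2.insert last (p.2.getD last 0 + 1)
  (p.1.items, cf.items)

-- ===== PRECONDITION & SPEC =====
def Spec_parse_polymer (polymer : String) (out : (List (String × Int)) × (List (String × Int))) : Prop := out = parse_polymer_alt polymer
instance (polymer : String) (out : (List (String × Int)) × (List (String × Int))) : Decidable (Spec_parse_polymer polymer out) := by unfold Spec_parse_polymer; infer_instance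

-- ===== CLAIM (what is proved, stated in full; the proofs are below) =====
def Claim_equal_parse_polymer : Prop := ∀ (polymer : String), Dom_parse_polymer polymer → Spec_parse_polymer polymer (parse_polymer polymer)

-- ===== LEMMAS AND PROOFS =====

-- the canonical value both ports are reduced to: Counter of the pair strings / of the 1-char strings
def canonPair (cs : List Char) : PySem.Dict String Int :=
  PySem.Dict.counter ((cs.zip (cs.drop 1)).map (fun ab => String.mk [ab.1, ab.2]))
def canonChar (cs : List Char) : PySem.Dict String Int :=
  PySem.Dict.counter (cs.map (fun c => String.mk [c]))

-- A's conditional zero-insert followed by += 1 is one Counter step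
theorem step_eq (d : PySem.Dict String Int) (k : String) :
    (let d1 := if d.contains k then d else d.insert k 0
     d1.insert k (d1.getD k 0 + 1)) = d.insert k (d.getD k 0 + 1) := by
  by_cases h : d.contains k
  · simp [h]
  · simp only [Bool.not_eq_true] at h
    simp [h, PySem.Dict.getD_insert_self, PySem.Dict.insert_insert_self,
          PySem.Dict.getD_of_not_contains _ _ h]

theorem foldl_insert_key {α : Type} (l : List α) (key : α → String) :
    l.foldl (fun d x => d.insert (key x) (d.getD (key x) 0 + 1)) PySem.Dict.empty
      = PySem.Dict.counter (l.map key) := by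
  rw [← PySem.Dict.foldl_insert_getD_add_one_eq_counter, List.foldl_map]

theorem foldl_step {α : Type} (l : List α) (key : α → String) :
    l.foldl (fun d x =>
        let k := key x
        let d1 := if d.contains k then d else d.insert k 0
        d1.insert k (d1.getD k 0 + 1)) PySem.Dict.empty
      = PySem.Dict.counter (l.map key) := by
  rw [← foldl_insert_key l key]
  congr 1
  funext d x
  exact step_eq d (key x)

theorem modify_eq_insert (d : PySem.Dict String Int) (k : String) :
    d.modify k 0 (· + 1) = d.insert k (d.getD k 0 + 1) := rfl

-- A's index loop visits exactly the adjacent pairs of the zip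
theorem pair_keys (cs : List Char) :
    (PySem.List.pyRange 0 ((cs.length : Int) - 1) 1).map
        (fun i => String.mk [PySem.List.pyGetD cs i ' ', PySem.List.pyGetD cs (i + 1) ' '])
      = (cs.zip (cs.drop 1)).map (fun ab => String.mk [ab.1, ab.2]) := by
  cases cs with
  | nil => decide
  | cons a t =>
    have hlen : (((a :: t).length : Int) - 1) = ((t.length : Nat) : Int) := by
      simp only [List.length_cons]; omega
    rw [hlen, PySem.List.pyRange_zero_natCast, List.map_map]
    apply List.ext_getElem
    · simp [List.length_zip]
    · intro i h1 h2
      simp only [List.length_map, List.length_range] at h1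
      have e1 : PySem.List.pyGetD (a :: t) ((i : Nat) : Int) ' ' = (a :: t)[i] := by
        rw [PySem.List.pyGetD_eq_getElem (a :: t) ' ' (by positivity)
            (by simp only [List.length_cons]; omega)]
        simp
      have e2 : PySem.List.pyGetD (a :: t) (((i : Nat) : Int) + 1) ' ' = (a :: t)[i + 1] := by
        have : (((i : Nat) : Int) + 1) = (((i + 1 : Nat)) : Int) := by push_cast; ring
        rw [this, PySem.List.pyGetD_eq_getElem (a :: t) ' ' (by positivity)
            (by simp only [List.length_cons]; omega)]
        simp
      simp only [List.getElem_map, Function.comp, List.getElem_range, List.getElem_zip, e1, e2]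
      simp [List.getElem_cons_succ]
  
-- the first components of the zip are all characters but the last
theorem fst_keys (cs : List Char) :
    (cs.zip (cs.drop 1)).map (fun ab => String.mk [ab.1])
      = cs.dropLast.map (fun c => String.mk [c]) := by
  apply List.ext_getElem
  · simp [List.length_zip, List.length_dropLast]
  · intro i h1 h2
    simp [List.getElem_zip, List.getElem_dropLast]

theorem pyGetD_neg_one (cs : List Char) (h : cs ≠ []) :
    PySem.List.pyGetD cs (-1) ' ' = cs.getLast h := by
  have h1 : 1 ≤ cs.length := List.length_pos_iff.mpr h
  have h2 : cs.length - 1 < cs.length := by omega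
  simp [PySem.List.pyGetD, PySem.List.pyGet?, PySem.List.pyIdx?, h1,
        List.getElem?_eq_getElem h2, List.getLast_eq_getElem]

theorem A_canon (polymer : String) :
    parse_polymer polymer = ((canonPair polymer.toList).items, (canonChar polymer.toList).items) := by
  unfold parse_polymer canonPair canonChar
  rw [foldl_step (PySem.List.pyRange 0 (PySem.Str.len polymer - 1) 1)
        (fun i => String.mk [PySem.List.pyGetD polymer.toList i ' ',
                             PySem.List.pyGetD polymer.toList (i + 1) ' ']),
      foldl_step polymer.toList (fun c => String.mk [c]),
      PySem.Str.len_eq, pair_keys polymer.toList]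

theorem B_canon (polymer : String) :
    parse_polymer_alt polymer = ((canonPair polymer.toList).items, (canonChar polymer.toList).items) := by
  unfold parse_polymer_alt canonPair canonChar
  rw [PySem.List.foldl_prod_mk
        (f := fun (d : PySem.Dict String Int) (ab : Char × Char) =>
          d.insert (String.mk [ab.1, ab.2]) (d.getD (String.mk [ab.1, ab.2]) 0 + 1))
        (g := fun (d : PySem.Dict String Int) (ab : Char × Char) =>
          d.insert (String.mk [ab.1]) (d.getD (String.mk [ab.1]) 0 + 1)),
      foldl_insert_key (polymer.toList.zip (polymer.toList.drop 1))
        (fun ab => String.mk [ab.1, ab.2]),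
      foldl_insert_key (polymer.toList.zip (polymer.toList.drop 1))
        (fun ab => String.mk [ab.1]),
      fst_keys polymer.toList]
  by_cases h : polymer.toList = []
  · simp [h]
  · simp only [if_neg h, pyGetD_neg_one polymer.toList h]
    refine congrArg₂ Prod.mk rfl ?_
    conv_rhs => rw [← List.dropLast_concat_getLast h]
    simp only [List.map_append, List.map_cons, List.map_nil,
               PySem.Dict.counter_append_singleton, modify_eq_insert]

-- ===== VERDICT (by name: the statement is the Claim_ definition above) =====
theorem parse_polymer_spec : Claim_equal_parse_polymer := by
  intro polymer _
  show parse_polymer polymer = parse_polymer_alt polymer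
  rw [A_canon, B_canon]
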